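-- pv_equiv track=rewrite | github.com/UsernameTron/Linkedin-Chatbot | MY Data/process_feed_pdf.py | categorize_posts
-- ===== SOURCE A (Python) =====
-- def categorize_posts(text):
--     """Categorizes posts based on keywords in the text."""
--     categories = {"Educational": 0, "Promotional": 0, "Engagement": 0}
--     for line in text.splitlines():
--         if "educational" in line.lower():
--             categories["Educational"] += 1
--         elif "promo" in line.lower() or "sale" in line.lower():
--             categories["Promotional"] += 1
--         elif "engage" in line.lower() or "like" in line.lower():
--             categories["Engagement"] += 1
--     return categories
-- ===== SOURCE B (Python) =====
-- def categorize_posts(text):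
--     """Categorizes posts based on keywords: lowercase once, then three staged counting passes."""
--     lows = [line.lower() for line in text.splitlines()]
--     edu = sum(1 for l in lows if "educational" in l)
--     promo = sum(1 for l in lows
--                 if "educational" not in l and ("promo" in l or "sale" in l))
--     eng = sum(1 for l in lows
--               if "educational" not in l and "promo" not in l and "sale" not in l
--               and ("engage" in l or "like" in l))
--     return {"Educational": edu, "Promotional": promo, "Engagement": eng}
-- ===== Notes on version B (the rewrite author's own statement) =====
-- stated objective: alternative
-- what changed: Replaces the single-pass dict accumulator with an if/elif chain by one lowering pass followed by three independent filtered counting passes (each later category's filter excludes the earlier categories' keywords), building the result dict once at the end.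
import Mathlib
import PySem

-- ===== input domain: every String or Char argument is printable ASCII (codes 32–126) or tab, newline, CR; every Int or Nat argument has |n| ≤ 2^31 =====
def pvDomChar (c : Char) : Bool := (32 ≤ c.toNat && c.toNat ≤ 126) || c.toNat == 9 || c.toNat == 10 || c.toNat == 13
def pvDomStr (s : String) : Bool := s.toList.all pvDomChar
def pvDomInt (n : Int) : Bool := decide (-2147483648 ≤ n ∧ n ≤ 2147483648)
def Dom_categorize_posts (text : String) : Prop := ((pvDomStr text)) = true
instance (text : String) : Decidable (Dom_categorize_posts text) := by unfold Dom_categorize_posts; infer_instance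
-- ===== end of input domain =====

-- B replaces A's single-pass dict accumulator (if/elif chain) by one lowering pass followed by
-- three independent filtered counting passes; same result (objective: alternative).


-- ===== PORT A =====
-- the loop body of A: the if/elif chain over one line, updating the dict accumulator
def catStepA (d : PySem.Dict String Int) (line : String) : PySem.Dict String Int :=
  if PySem.Str.isIn "educational" (PySem.Str.lower line) then
    d.modify "Educational" 0 (· + 1)
  else if PySem.Str.isIn "promo" (PySem.Str.lower line) || PySem.Str.isIn "sale" (PySem.Str.lower line) then
    d.modify "Promotional" 0 (· + 1)
  else if PySem.Str.isIn "engage" (PySem.Str.lower line) || PySem.Str.isIn "like" (PySem.Str.lower line) then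
    d.modify "Engagement" 0 (· + 1)
  else d

def categorize_posts (text : String) : List (String × Int) :=
  (((PySem.Dict.empty.insert "Educational" (0 : Int)).insert "Promotional" 0
      |>.insert "Engagement" 0
      |> (PySem.Str.splitlines text).foldl catStepA)).items

-- ===== PORT B =====
-- B's three filters over an already-lowered line
def pEduB (low : String) : Bool := PySem.Str.isIn "educational" low
def pProB (low : String) : Bool :=
  !PySem.Str.isIn "educational" low && (PySem.Str.isIn "promo" low || PySem.Str.isIn "sale" low)
def pEngB (low : String) : Bool :=
  !PySem.Str.isIn "educational" low && !PySem.Str.isIn "promo" low && !PySem.Str.isIn "sale" low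
    && (PySem.Str.isIn "engage" low || PySem.Str.isIn "like" low)

def categorize_posts_alt (text : String) : List (String × Int) :=
  let lows := (PySem.Str.splitlines text).map PySem.Str.lower
  [("Educational", (lows.countP pEduB : Int)),
   ("Promotional", (lows.countP pProB : Int)),
   ("Engagement", (lows.countP pEngB : Int))]

-- ===== PRECONDITION & SPEC =====
def Spec_categorize_posts (text : String) (out : List (String × Int)) : Prop := out = categorize_posts_alt text
instance (text : String) (out : List (String × Int)) : Decidable (Spec_categorize_posts text out) := by unfold Spec_categorize_posts; infer_instance

-- ===== CLAIM (what is proved, stated in full; the proofs are below) =====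
def Claim_equal_categorize_posts : Prop := ∀ (text : String), Dom_categorize_posts text → Spec_categorize_posts text (categorize_posts text)

-- ===== LEMMAS AND PROOFS =====
-- reductions of A's three dict updates on the three-key accumulator
theorem modE (a b c : Int) :
    (PySem.Dict.mk [("Educational", a), ("Promotional", b), ("Engagement", c)]).modify "Educational" 0 (· + 1)
      = PySem.Dict.mk [("Educational", a + 1), ("Promotional", b), ("Engagement", c)] := by
  simp [pysem, PySem.Dict.modify, PySem.Dict.insert, PySem.Dict.contains]

theorem modP (a b c : Int) :
    (PySem.Dict.mk [("Educational", a), ("Promotional", b), ("Engagement", c)]).modify "Promotional" 0 (· + 1)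
      = PySem.Dict.mk [("Educational", a), ("Promotional", b + 1), ("Engagement", c)] := by
  simp [pysem, PySem.Dict.modify, PySem.Dict.insert, PySem.Dict.contains]

theorem modG (a b c : Int) :
    (PySem.Dict.mk [("Educational", a), ("Promotional", b), ("Engagement", c)]).modify "Engagement" 0 (· + 1)
      = PySem.Dict.mk [("Educational", a), ("Promotional", b), ("Engagement", c + 1)] := by
  simp [pysem, PySem.Dict.modify, PySem.Dict.insert, PySem.Dict.contains]

-- invariant of A's loop: starting from the three-key dict, it adds B's three counts componentwise
theorem foldl_catStepA (lines : List String) (a b c : Int) :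
    (lines.foldl catStepA (PySem.Dict.mk [("Educational", a), ("Promotional", b), ("Engagement", c)])).items
      = [("Educational", a + ((lines.map PySem.Str.lower).countP pEduB : Int)),
         ("Promotional", b + ((lines.map PySem.Str.lower).countP pProB : Int)),
         ("Engagement", c + ((lines.map PySem.Str.lower).countP pEngB : Int))] := by
  induction lines generalizing a b c with
  | nil => simp
  | cons l ls ih =>
    simp only [List.foldl_cons, catStepA, List.map_cons, List.countP_cons]
    cases h1 : PySem.Str.isIn "educational" (PySem.Str.lower l) <;>
    cases h2 : PySem.Str.isIn "promo" (PySem.Str.lower l) <;>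
    cases h3 : PySem.Str.isIn "sale" (PySem.Str.lower l) <;>
    cases h4 : PySem.Str.isIn "engage" (PySem.Str.lower l) <;>
    cases h5 : PySem.Str.isIn "like" (PySem.Str.lower l) <;>
    simp only [h1, h2, h3, h4, h5, pEduB, pProB, pEngB, Bool.or_false, Bool.or_true,
      Bool.not_true, Bool.not_false, Bool.and_true, Bool.and_false, if_true, if_false,
      Bool.false_eq_true, modE, modP, modG, ih] <;>
    push_cast <;> ring_nf

-- ===== VERDICT (by name: the statement is the Claim_ definition above) =====
theorem categorize_posts_spec : Claim_equal_categorize_posts := by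
  intro text _
  unfold Spec_categorize_posts categorize_posts categorize_posts_alt
  have hinit : ((PySem.Dict.empty.insert "Educational" (0 : Int)).insert "Promotional" 0).insert "Engagement" 0
      = PySem.Dict.mk [("Educational", 0), ("Promotional", 0), ("Engagement", 0)] := by decide
  rw [hinit, foldl_catStepA]
  simp
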